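-- pv_equiv track=rewrite | github.com/kalehub/tuntas-hacker-rank | jumping_on_the_clouds.py | jumping_on_the_cloud
-- ===== SOURCE A (Python) =====
-- def jumping_on_the_cloud(cloud_arr, jump_dist):
--     curr = 0
--     on_start = False
--     energy_left = 100
--
--     while not on_start:
--         energy_left -= 1
--         curr = (curr+jump_dist) % len(cloud_arr)
--         if cloud_arr[curr] == 1:
--             energy_left -= 2
--         if curr == 0:
--             on_start = True
--
--     return energy_left
-- ===== SOURCE B (Python) =====
-- def jumping_on_the_cloud(cloud_arr, jump_dist):
--     n = len(cloud_arr)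
--     r = jump_dist % n          # ZeroDivisionError on empty input, same as A
--     g = n
--     while r:
--         g, r = r, g % r        # g = gcd(n, jump_dist % n)
--     steps = n // g             # number of jumps in the full cycle
--     ones = sum(1 for i in range(0, n, g) if cloud_arr[i] == 1)
--     return 100 - steps - 2 * ones
-- ===== Notes on version B (the rewrite author's own statement) =====
-- stated objective: faster
-- what changed: Replaces A's step-by-step while-loop simulation of the circular walk by a gcd-based closed form: the visited positions are exactly the multiples of g = gcd(n, jump_dist % n), each hit once, so B computes n//g steps directly and counts ones along range(0, n, g).
import Mathlib
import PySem

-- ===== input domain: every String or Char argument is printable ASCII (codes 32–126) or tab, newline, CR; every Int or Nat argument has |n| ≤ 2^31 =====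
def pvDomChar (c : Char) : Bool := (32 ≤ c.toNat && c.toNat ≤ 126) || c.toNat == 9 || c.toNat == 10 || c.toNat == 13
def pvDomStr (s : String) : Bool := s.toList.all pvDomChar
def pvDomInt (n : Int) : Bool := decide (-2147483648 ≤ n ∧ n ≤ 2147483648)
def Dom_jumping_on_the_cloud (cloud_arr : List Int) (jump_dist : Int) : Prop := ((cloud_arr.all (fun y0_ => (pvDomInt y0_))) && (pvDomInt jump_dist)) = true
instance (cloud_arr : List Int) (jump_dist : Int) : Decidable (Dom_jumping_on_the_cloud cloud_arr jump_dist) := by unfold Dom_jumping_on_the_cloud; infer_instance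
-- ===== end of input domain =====

-- B replaces A's while-loop simulation of the circular walk by a gcd-based closed form over the
-- arithmetic progression of visited positions (objective: alternative algorithm, similar cost).


-- ===== PORT A =====
-- A's while-loop, ported with fuel = cloud_arr.length: under Pre_ (nonempty list) the loop provably
-- returns to position 0 within cloud_arr.length iterations, so the fuel-0 default is unreachable.
-- cloud_arr[curr] is always in range (curr = (…) % len), so pyGetD's default is unreachable too.
def jotcLoop (cloud_arr : List Int) (jump_dist : Int) : Nat → Int → Int → Int
  | 0, _, energy_left => energy_left
  | fuel+1, curr, energy_left =>
    let e1 := energy_left - 1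
    let c1 := PySem.Int.mod (curr + jump_dist) (cloud_arr.length : Int)
    let e2 := if PySem.List.pyGetD cloud_arr c1 0 == 1 then e1 - 2 else e1
    if c1 == 0 then e2 else jotcLoop cloud_arr jump_dist fuel c1 e2

def jumping_on_the_cloud (cloud_arr : List Int) (jump_dist : Int) : Int :=
  jotcLoop cloud_arr jump_dist cloud_arr.length 0 100

-- ===== PORT B =====
-- Source B's Euclid loop: while r: g, r = r, g % r
def gcdLoop (g r : Nat) : Nat :=
  if h : r = 0 then g else gcdLoop r (g % r)
termination_by r
decreasing_by exact Nat.mod_lt _ (Nat.pos_of_ne_zero h)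

def jumping_on_the_cloud_alt (cloud_arr : List Int) (jump_dist : Int) : Int :=
  let n := cloud_arr.length
  let r := (PySem.Int.mod jump_dist (n : Int)).toNat   -- jump_dist % n (nonnegative; n > 0 under Pre_)
  let g := gcdLoop n r
  let steps := n / g
  let ones := ((PySem.List.pyRange 0 (n : Int) (g : Int)).map
      (fun i => if PySem.List.pyGetD cloud_arr i 0 == 1 then (1 : Int) else 0)).sum
  100 - (steps : Int) - 2 * ones

-- ===== PRECONDITION & SPEC =====
-- Pre_ excludes only the empty list, on which A raises ZeroDivisionError ('% len(cloud_arr)'); B raises there too.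
def Pre_jumping_on_the_cloud (cloud_arr : List Int) (jump_dist : Int) : Prop := cloud_arr ≠ []
instance (cloud_arr : List Int) (jump_dist : Int) : Decidable (Pre_jumping_on_the_cloud cloud_arr jump_dist) := by unfold Pre_jumping_on_the_cloud; infer_instance

def pvWitness_jumping_on_the_cloud : List Int × Int := ([0, 1, 0, 1], 3)

def Spec_jumping_on_the_cloud (cloud_arr : List Int) (jump_dist : Int) (out : Int) : Prop := out = jumping_on_the_cloud_alt cloud_arr jump_dist
instance (cloud_arr : List Int) (jump_dist : Int) (out : Int) : Decidable (Spec_jumping_on_the_cloud cloud_arr jump_dist out) := by unfold Spec_jumping_on_the_cloud; infer_instance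

-- ===== CLAIM (what is proved, stated in full; the proofs are below) =====
def Claim_equal_jumping_on_the_cloud : Prop := ∀ (cloud_arr : List Int) (jump_dist : Int), Dom_jumping_on_the_cloud cloud_arr jump_dist → Pre_jumping_on_the_cloud cloud_arr jump_dist → Spec_jumping_on_the_cloud cloud_arr jump_dist (jumping_on_the_cloud cloud_arr jump_dist)

-- ===== LEMMAS AND PROOFS =====

-- Source B's Euclid loop computes gcd
theorem gcdLoop_eq_gcd (g r : Nat) : gcdLoop g r = Nat.gcd g r := by
  induction r using Nat.strong_induction_on generalizing g with
  | _ r ih =>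
    rw [gcdLoop]
    split
    · simp [*]
    · rename_i h
      rw [ih (g % r) (Nat.mod_lt _ (Nat.pos_of_ne_zero h)) r]
      rw [Nat.gcd_comm r, ← Nat.gcd_rec, Nat.gcd_comm]

-- n never divides k*j for 0 < k < n / gcd n j
theorem not_dvd_of_lt_div_gcd (n j k : Nat) (hk : 0 < k) (hk' : k < n / Nat.gcd n j) :
    ¬ n ∣ k * j := by
  intro hdvd
  set g := Nat.gcd n j with hg
  have hnpos : 0 < n := by
    by_contra hc
    have : n = 0 := by omega
    subst this
    simp at hk'
  have hgpos : 0 < g := Nat.gcd_pos_of_pos_left j hnpos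
  have hgn : g ∣ n := Nat.gcd_dvd_left n j
  have hgj : g ∣ j := Nat.gcd_dvd_right n j
  have co : Nat.Coprime (n / g) (j / g) := Nat.coprime_div_gcd_div_gcd hgpos
  have h1 : n / g ∣ k * (j / g) := by
    have hn' : n = (n / g) * g := (Nat.div_mul_cancel hgn).symm
    have hj' : j = (j / g) * g := (Nat.div_mul_cancel hgj).symm
    have : (n / g) * g ∣ (k * (j / g)) * g := by rw [← hn']; rw [hj'] at hdvd; convert hdvd using 1; ring
    exact (Nat.mul_dvd_mul_iff_right hgpos).mp this
  have h2 : n / g ∣ k := co.dvd_of_dvd_mul_right h1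
  exact absurd (Nat.le_of_dvd hk h2) (by omega)

-- the visited positions {(s+1)*j % n : s < n/g} are exactly the multiples of g = gcd n j below n
theorem sum_visited_eq_sum_multiples (n j : Nat) (hn : 0 < n) (F : Nat → Int) :
    ∑ s ∈ Finset.range (n / Nat.gcd n j), F ((s+1) * j % n)
      = ∑ i ∈ Finset.range (n / Nat.gcd n j), F (i * Nat.gcd n j) := by
  set g := Nat.gcd n j with hg
  set k0 := n / g with hk0
  have hgpos : 0 < g := Nat.gcd_pos_of_pos_left j hn
  have hgn : g ∣ n := Nat.gcd_dvd_left n j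
  have hgj : g ∣ j := Nat.gcd_dvd_right n j
  have inj1 : ∀ x ∈ Finset.range k0, ∀ y ∈ Finset.range k0,
      (x+1) * j % n = (y+1) * j % n → x = y := by
    have key : ∀ x y, x < y → y < k0 → (x+1) * j % n = (y+1) * j % n → False := by
      intro x y hxy hy heq
      have hmod : (x+1) * j ≡ (y+1) * j [MOD n] := heq
      have hle : (x+1) * j ≤ (y+1) * j := Nat.mul_le_mul_right j (by omega)
      have hdvd : n ∣ (y+1) * j - (x+1) * j := (Nat.modEq_iff_dvd' hle).mp hmod
      have hsub : (y+1) * j - (x+1) * j = (y - x) * j := by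
        rw [Nat.sub_mul, Nat.succ_mul, Nat.succ_mul]; omega
      rw [hsub] at hdvd
      exact not_dvd_of_lt_div_gcd n j (y - x) (by omega) (by rw [← hg]; omega) hdvd
    intro x hx y hy heq
    simp only [Finset.mem_range] at hx hy
    rcases lt_trichotomy x y with h | h | h
    · exact absurd (key x y h hy heq) (by simp)
    · exact h
    · exact absurd (key y x h hx heq.symm) (by simp)
  have inj2 : ∀ x ∈ Finset.range k0, ∀ y ∈ Finset.range k0, x * g = y * g → x = y := by
    intro x _ y _ h
    exact Nat.eq_of_mul_eq_mul_right hgpos h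
  have hsubset : (Finset.range k0).image (fun k => (k+1) * j % n)
      ⊆ (Finset.range k0).image (fun i => i * g) := by
    intro v hv
    simp only [Finset.mem_image, Finset.mem_range] at hv ⊢
    obtain ⟨k, hk, rfl⟩ := hv
    have hdv : g ∣ (k+1) * j % n := (Nat.dvd_mod_iff hgn).mpr (Dvd.dvd.mul_left hgj (k+1))
    have hlt : (k+1) * j % n < n := Nat.mod_lt _ hn
    refine ⟨((k+1) * j % n) / g, ?_, Nat.div_mul_cancel hdv⟩
    have := Nat.div_lt_div_of_lt_of_dvd hgn hlt
    omega
  have himg : (Finset.range k0).image (fun k => (k+1) * j % n)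
      = (Finset.range k0).image (fun i => i * g) := by
    apply Finset.eq_of_subset_of_card_le hsubset
    rw [Finset.card_image_of_injOn (fun x hx y hy => inj2 x hx y hy),
        Finset.card_image_of_injOn (fun x hx y hy => inj1 x hx y hy)]
  calc ∑ s ∈ Finset.range k0, F ((s+1) * j % n)
      = ∑ v ∈ (Finset.range k0).image (fun k => (k+1) * j % n), F v :=
        (Finset.sum_image inj1).symm
    _ = ∑ v ∈ (Finset.range k0).image (fun i => i * g), F v := by rw [himg]
    _ = ∑ i ∈ Finset.range k0, F (i * g) := Finset.sum_image inj2

-- one mod-step of A's loop, in terms of Nat positions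
theorem mod_step (n : Nat) (hn : 0 < n) (jump : Int) (m : Nat)
    (j : Nat) (hj : (jump % (n : Int)).toNat = j) :
    PySem.Int.mod (((m * j % n : Nat) : Int) + jump) (n : Int) = (((m+1) * j % n : Nat) : Int) := by
  have hnpos : (0 : Int) < (n : Int) := by exact_mod_cast hn
  have hne : (n : Int) ≠ 0 := by omega
  have hjc : ((j : Int)) = jump % (n : Int) := by
    rw [← hj]
    exact Int.toNat_of_nonneg (Int.emod_nonneg jump hne)
  rw [PySem.Int.mod_eq_emod_of_pos hnpos]
  have h1 : (((m * j % n : Nat) : Int) + jump) % (n : Int) = (((m * j : Nat) : Int) + jump) % (n : Int) := by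
    conv_rhs => rw [Int.add_emod]
    rw [Int.add_emod, Int.natCast_mod, Int.emod_emod_of_dvd _ dvd_rfl]
  have h2 : ((j : Int)) % (n : Int) = (j : Int) := by
    rw [hjc]; exact Int.emod_emod_of_dvd _ dvd_rfl
  rw [h1, Int.add_emod, ← hjc, ← h2, ← Int.add_emod]
  push_cast
  ring_nf

-- peeling the first visited position off the indicator sum
theorem sum_shift (F : Nat → Int) (t m : Nat) :
    ((List.range (t+1)).map (fun s => F (m + s + 1))).sum
      = F (m + 1) + ((List.range t).map (fun s => F (m + 1 + s + 1))).sum := by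
  rw [List.range_succ_eq_map, List.map_cons, List.sum_cons, List.map_map]
  congr 1
  apply congrArg
  apply List.map_congr_left
  intro a _
  simp only [Function.comp]
  congr 1
  omega

-- A's loop, evaluated: from position m*j % n with t+1 steps to go until the return to 0
theorem loop_eval (cloud : List Int) (jump : Int) (j k0 : Nat)
    (hn : 0 < cloud.length)
    (hj : (jump % (cloud.length : Int)).toNat = j)
    (H1 : ∀ k, 0 < k → k < k0 → (k * j) % cloud.length ≠ 0)
    (H2 : (k0 * j) % cloud.length = 0) :
    ∀ t m, m + (t + 1) = k0 → ∀ fuel, t + 1 ≤ fuel → ∀ e : Int,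
    jotcLoop cloud jump fuel ((m * j % cloud.length : Nat) : Int) e
      = e - (t + 1 : Nat) - 2 * (((List.range (t+1)).map (fun s =>
          if PySem.List.pyGetD cloud (((m+s+1) * j % cloud.length : Nat) : Int) 0 == 1 then (1:Int) else 0)).sum) := by
  intro t
  induction t with
  | zero =>
    intro m hm fuel hfuel e
    obtain ⟨f, rfl⟩ : ∃ f, fuel = f + 1 := ⟨fuel - 1, by omega⟩
    show (let e1 := e - 1;
          let c1 := PySem.Int.mod (((m * j % cloud.length : Nat) : Int) + jump) (cloud.length : Int);
          let e2 := if PySem.List.pyGetD cloud c1 0 == 1 then e1 - 2 else e1;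
          if c1 == 0 then e2 else jotcLoop cloud jump f c1 e2) = _
    rw [mod_step cloud.length hn jump m j hj]
    have hm0 : ((m+0+1) * j % cloud.length : Nat) = 0 := by
      rw [show m + 0 + 1 = k0 by omega]; exact H2
    simp only [List.range_succ, List.range_zero, List.nil_append, List.map_cons,
      List.map_nil, List.sum_cons, List.sum_nil, hm0]
    norm_num
    split <;> ring
  | succ t ih =>
    intro m hm fuel hfuel e
    obtain ⟨f, rfl⟩ : ∃ f, fuel = f + 1 := ⟨fuel - 1, by omega⟩
    show (let e1 := e - 1;
          let c1 := PySem.Int.mod (((m * j % cloud.length : Nat) : Int) + jump) (cloud.length : Int);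
          let e2 := if PySem.List.pyGetD cloud c1 0 == 1 then e1 - 2 else e1;
          if c1 == 0 then e2 else jotcLoop cloud jump f c1 e2) = _
    rw [mod_step cloud.length hn jump m j hj]
    have hne : ((m+1) * j % cloud.length : Nat) ≠ 0 := H1 (m+1) (by omega) (by omega)
    have hne' : ((((m+1) * j % cloud.length : Nat) : Int) == 0) = false := by
      simp only [beq_eq_false_iff_ne, ne_eq, Int.natCast_eq_zero]
      exact hne
    simp only [hne', Bool.false_eq_true, if_false]
    rw [ih (m+1) (by omega) f (by omega)]
    rw [sum_shift (fun x =>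
      if PySem.List.pyGetD cloud ((x * j % cloud.length : Nat) : Int) 0 == 1 then (1:Int) else 0) (t+1) m]
    split <;> push_cast <;> ring

-- ===== VERDICT (by name: the statement is the Claim_ definition above) =====
theorem jumping_on_the_cloud_spec : Claim_equal_jumping_on_the_cloud := by
  intro cloud jump _ hpre
  unfold Spec_jumping_on_the_cloud jumping_on_the_cloud jumping_on_the_cloud_alt
  simp only []
  have hn : 0 < cloud.length := List.length_pos_of_ne_nil hpre
  set n := cloud.length with hnn
  have hnpos : (0:Int) < (n:Int) := by exact_mod_cast hn
  have hmodemod : PySem.Int.mod jump (n:Int) = jump % (n:Int) := PySem.Int.mod_eq_emod_of_pos hnpos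
  rw [hmodemod, gcdLoop_eq_gcd]
  set j := (jump % (n:Int)).toNat with hjdef
  have hj : (jump % (n:Int)).toNat = j := rfl
  have hjn : j < n := by
    have h1 := Int.emod_lt_of_pos jump hnpos
    have h0 := Int.emod_nonneg jump (by omega : (n:Int) ≠ 0)
    omega
  set g := Nat.gcd n j with hgdef
  have hgpos : 0 < g := Nat.gcd_pos_of_pos_left j hn
  have hgn : g ∣ n := Nat.gcd_dvd_left n j
  have hgj : g ∣ j := Nat.gcd_dvd_right n j
  set k0 := n / g with hk0def
  have hk0pos : 0 < k0 := Nat.div_pos (Nat.le_of_dvd hn hgn) hgpos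
  have H2 : (k0 * j) % n = 0 := by
    have hd : n ∣ k0 * j := by
      obtain ⟨q, hq⟩ := hgj
      exact ⟨q, by rw [hq, hk0def, ← Nat.mul_assoc, Nat.div_mul_cancel hgn]⟩
    omega
  have H1 : ∀ k, 0 < k → k < k0 → (k * j) % n ≠ 0 := by
    intro k hk hk' hmod
    refine not_dvd_of_lt_div_gcd n j k hk ?_ ?_
    · rw [← hgdef]; omega
    · omega
  -- A's loop evaluated
  have hA := loop_eval cloud jump j k0 hn hj H1 H2 (k0 - 1) 0 (by omega) n
      (by have := Nat.div_le_self n g; omega) 100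
  rw [show k0 - 1 + 1 = k0 by omega] at hA
  have hA0 : ((0 * j % n : Nat) : Int) = 0 := by norm_num
  rw [hA0] at hA
  rw [hA]
  -- B's range of visited multiples
  rw [PySem.List.pyRange_of_pos 0 (n:Int) (by exact_mod_cast hgpos)]
  have hif : (if (0:Int) < (n:Int) then (((n:Int) - 0 + (g:Int) - 1) / (g:Int)).toNat else 0) = k0 := by
    rw [if_pos hnpos]
    have h1 : ((n:Int) - 0 + (g:Int) - 1) = ((n + g - 1 : Nat) : Int) := by omega
    rw [h1, ← Int.natCast_ediv, Int.toNat_natCast]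
    obtain ⟨q, hq⟩ := hgn
    have h2 : n + g - 1 = g * q + (g - 1) := by omega
    rw [h2, Nat.mul_add_div hgpos, Nat.div_eq_of_lt (by omega)]
    have h3 : k0 = q := by rw [hk0def, hq, Nat.mul_div_right q hgpos]
    omega
  rw [hif]
  -- both sums over range k0; compare via the multiples-of-g characterisation
  have hB : (List.map (fun i => if PySem.List.pyGetD cloud i 0 == 1 then (1:Int) else 0)
        ((List.range k0).map (fun (k : Nat) => 0 + (g:Int) * (k:Int)))).sum
      = ((List.range k0).map (fun i =>
          if PySem.List.pyGetD cloud ((i * g : Nat) : Int) 0 == 1 then (1:Int) else 0)).sum := by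
    rw [List.map_map]
    congr 1
    apply List.map_congr_left
    intro a _
    simp only [Function.comp]
    have h4 : (0 + (g:Int) * (a:Int)) = ((a * g : Nat) : Int) := by push_cast; ring
    simp only [h4]
  rw [hB]
  congr 1
  congr 1
  have hsum := sum_visited_eq_sum_multiples n j hn
      (fun x => if PySem.List.pyGetD cloud ((x : Nat) : Int) 0 == 1 then (1:Int) else 0)
  rw [← hgdef, ← hk0def] at hsum
  calc ((List.range k0).map (fun s =>
          if PySem.List.pyGetD cloud (((0+s+1) * j % n : Nat) : Int) 0 == 1 then (1:Int) else 0)).sum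
      = ((List.range k0).map (fun s =>
          if PySem.List.pyGetD cloud (((s+1) * j % n : Nat) : Int) 0 == 1 then (1:Int) else 0)).sum := by
        congr 1
        apply List.map_congr_left
        intro a _
        rw [Nat.zero_add]
    _ = ∑ s ∈ Finset.range k0, (fun x =>
          if PySem.List.pyGetD cloud ((x : Nat) : Int) 0 == 1 then (1:Int) else 0) ((s+1) * j % n) := rfl
    _ = ∑ i ∈ Finset.range k0, (fun x =>
          if PySem.List.pyGetD cloud ((x : Nat) : Int) 0 == 1 then (1:Int) else 0) (i * g) := hsum
    _ = ((List.range k0).map (fun i =>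
          if PySem.List.pyGetD cloud ((i * g : Nat) : Int) 0 == 1 then (1:Int) else 0)).sum := rfl
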